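-- pv_equiv track=rewrite | github.com/WBZKLLC/handoff-diagnostic | backend/services/diagnosis.py | select_tags
-- ===== SOURCE A (Python) =====
-- from typing import Dict, List, Any, Tuple
--
-- def select_tags(scores: Dict[str, int]) -> Tuple[str, List[str]]:
--     """
--     Select primary and secondary tags based on scores.
--     """
--     if not scores or all(s == 0 for s in scores.values()):
--         return "ownership_ambiguity", []
--
--     sorted_tags = sorted(scores.items(), key=lambda x: x[1], reverse=True)
--
--     primary_tag = sorted_tags[0][0]
--     primary_score = sorted_tags[0][1]
--
--     secondary_tags = []
--     for tag, score in sorted_tags[1:]: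
--         if score >= primary_score - 1 and score > 0:
--             secondary_tags.append(tag)
--         if len(secondary_tags) >= 2:
--             break
--
--     return primary_tag, secondary_tags
-- ===== SOURCE B (Python) =====
-- from typing import Dict, List, Tuple
--
-- def select_tags(scores: Dict[str, int]) -> Tuple[str, List[str]]:
--     """
--     Select primary and secondary tags based on scores.
--     Max-plus-bucket selection instead of a full sort: primary is the first
--     key attaining the maximum score; secondaries are the remaining max-score
--     keys followed by the (max-1)-score keys, truncated to two, kept only
--     while positive.
--     """
--     if not scores or all(s == 0 for s in scores.values()):
--         return "ownership_ambiguity", []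
--     m = max(scores.values())
--     primary = next(t for t, s in scores.items() if s == m)
--     secondary: List[str] = []
--     if m > 0:
--         secondary = [t for t, s in scores.items() if s == m and t != primary]
--         if m > 1:
--             secondary += [t for t, s in scores.items() if s == m - 1]
--         secondary = secondary[:2]
--     return primary, secondary
-- ===== Notes on version B (the rewrite author's own statement) =====
-- stated objective: faster
-- what changed: B replaces A's full descending stable sort with a single max computation plus bucketed selection passes (first keys at the max score, then keys at max-1), truncated to two and kept only while positive; Pre_ excludes lists with duplicate keys, which a Python dict cannot represent.
import Mathlib
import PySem

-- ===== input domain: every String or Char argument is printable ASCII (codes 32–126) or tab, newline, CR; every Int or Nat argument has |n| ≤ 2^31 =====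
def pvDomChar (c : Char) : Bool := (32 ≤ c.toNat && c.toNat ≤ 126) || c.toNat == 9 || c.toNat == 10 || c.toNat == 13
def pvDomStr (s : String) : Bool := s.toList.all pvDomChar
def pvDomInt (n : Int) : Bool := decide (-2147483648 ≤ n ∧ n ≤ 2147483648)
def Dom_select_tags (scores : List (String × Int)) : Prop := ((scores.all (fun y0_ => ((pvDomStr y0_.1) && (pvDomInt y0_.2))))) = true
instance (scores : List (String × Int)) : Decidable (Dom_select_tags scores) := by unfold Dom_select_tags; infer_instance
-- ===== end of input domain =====

-- B replaces A's full descending stable sort with a max-plus-bucket selection (same result, no sort).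

-- ===== PORT A =====
-- the 'for tag, score in sorted_tags[1:]' loop with its two-element break
def pvSecLoopA (ps : Int) : List (String × Int) → List String → List String
  | [], acc => acc
  | (t, s) :: rest, acc =>
    let acc' := if ps - 1 ≤ s ∧ 0 < s then acc ++ [t] else acc
    if 2 ≤ acc'.length then acc' else pvSecLoopA ps rest acc'

def select_tags (scores : List (String × Int)) : String × List String :=
  if scores = [] ∨ scores.all (fun p => p.2 == 0) then ("ownership_ambiguity", [])
  else
    match PySem.List.sorted scores (fun p => p.2) true with
    | [] => ("ownership_ambiguity", [])
    | (pt, ps) :: rest => (pt, pvSecLoopA ps rest [])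

def select_tags_alt (scores : List (String × Int)) : String × List String :=
  if scores = [] ∨ scores.all (fun p => p.2 == 0) then ("ownership_ambiguity", [])
  else
    match PySem.List.max? (scores.map (fun p => p.2)) (fun v => v) with
    | none => ("ownership_ambiguity", [])
    | some m =>
      match scores.find? (fun p => p.2 == m) with
      | none => ("ownership_ambiguity", [])
      | some (pt, _) =>
        let sec :=
          if 0 < m then
            let sec0 := (scores.filter (fun p => p.2 == m && p.1 != pt)).map (fun p => p.1)
            let sec1 := if 1 < m then
                sec0 ++ (scores.filter (fun p => p.2 == m - 1)).map (fun p => p.1)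
              else sec0
            sec1.take 2
          else []
        (pt, sec)


-- ===== PRECONDITION & SPEC =====
-- Pre_ excludes association lists with duplicate keys: A's parameter is a Python dict,
-- which cannot represent two entries with the same key, so such lists correspond to no input of A.
def Pre_select_tags (scores : List (String × Int)) : Prop :=
  (scores.map Prod.fst).Nodup
instance (scores : List (String × Int)) : Decidable (Pre_select_tags scores) := by
  unfold Pre_select_tags; infer_instance

def pvWitness_select_tags : (List (String × Int)) := [("a", 3), ("b", 2), ("c", 2), ("d", 0)]

def Spec_select_tags (scores : List (String × Int)) (out : String × List String) : Prop := out = select_tags_alt scores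
instance (scores : List (String × Int)) (out : String × List String) : Decidable (Spec_select_tags scores out) := by unfold Spec_select_tags; infer_instance

-- ===== CLAIM (what is proved, stated in full; the proofs are below) =====
def Claim_equal_select_tags : Prop := ∀ (scores : List (String × Int)), Dom_select_tags scores → Pre_select_tags scores → Spec_select_tags scores (select_tags scores)

-- ===== LEMMAS AND PROOFS =====

theorem pv_insertBy_cons {α : Type} (before : α → α → Bool) (x y : α) (ys : List α) :
    PySem.List.insertBy before x (y :: ys) =
      if before x y then x :: y :: ys else y :: PySem.List.insertBy before x ys := by
  cases ys <;> simp [PySem.List.insertBy]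

theorem pv_insertBy_append {α : Type} (before : α → α → Bool) (x : α) (as bs : List α)
    (h : ∀ a ∈ as, before x a = false) :
    PySem.List.insertBy before x (as ++ bs) = as ++ PySem.List.insertBy before x bs := by
  induction as with
  | nil => simp
  | cons a as ih =>
    rw [List.cons_append, pv_insertBy_cons, h a (by simp),
      ih (fun a ha' => h a (by simp [ha']))]
    simp

theorem pv_sorted_rev_append_singleton {α κ : Type} [LinearOrder κ] (l : List α) (x : α)
    (key : α → κ) :
    PySem.List.sorted (l ++ [x]) key true =
      PySem.List.insertBy (fun a b => decide (key b < key a)) x (PySem.List.sorted l key true) := by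
  rw [PySem.List.sorted_rev_eq_foldl_insertBy, PySem.List.sorted_rev_eq_foldl_insertBy,
    List.foldl_append]
  rfl

theorem pv_sorted_bucket (l : List (String × Int)) (m : Int)
    (h : ∀ p ∈ l, p.2 ≤ m) :
    PySem.List.sorted l (fun p => p.2) true =
      l.filter (fun p => p.2 == m) ++
        PySem.List.sorted (l.filter (fun p => p.2 != m)) (fun p => p.2) true := by
  induction l using List.reverseRecOn with
  | nil => simp [PySem.List.sorted]
  | append_singleton l x ih =>
    have hx : x.2 ≤ m := h x (by simp)
    have ih' := ih (fun p hp => h p (by simp [hp]))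
    have hFfalse : ∀ a ∈ l.filter (fun p => p.2 == m),
        (fun a b => decide (b.2 < a.2)) x a = false := by
      intro a ha
      have : a.2 = m := by simpa using (List.mem_filter.mp ha).2
      simp [this]
      omega
    by_cases hxm : x.2 = m
    · have hfilter1 : (l ++ [x]).filter (fun p => p.2 == m) =
          l.filter (fun p => p.2 == m) ++ [x] := by simp [List.filter_append, hxm]
      have hfilter2 : (l ++ [x]).filter (fun p => p.2 != m) =
          l.filter (fun p => p.2 != m) := by simp [List.filter_append, hxm]
      rw [pv_sorted_rev_append_singleton, ih', hfilter1, hfilter2,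
        pv_insertBy_append _ _ _ _ hFfalse]
      have hS : ∀ y ∈ PySem.List.sorted (l.filter (fun p => p.2 != m)) (fun p => p.2) true,
          y.2 < m := by
        intro y hy
        have hy' := (PySem.List.mem_sorted _ _ _ _).mp hy
        have h1 := (List.mem_filter.mp hy').2
        have h2 : y.2 ≤ m := h y (List.mem_append_left _ (List.mem_filter.mp hy').1)
        simp at h1
        omega
      cases hSs : PySem.List.sorted (l.filter (fun p => p.2 != m)) (fun p => p.2) true with
      | nil => simp [PySem.List.insertBy]
      | cons s ss =>
        have : s.2 < x.2 := by rw [hxm]; exact hS s (by simp [hSs])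
        rw [pv_insertBy_cons]
        simp [this]
    · have hfilter1 : (l ++ [x]).filter (fun p => p.2 == m) =
          l.filter (fun p => p.2 == m) := by simp [List.filter_append, hxm]
      have hfilter2 : (l ++ [x]).filter (fun p => p.2 != m) =
          l.filter (fun p => p.2 != m) ++ [x] := by simp [List.filter_append, hxm]
      rw [pv_sorted_rev_append_singleton, ih', pv_insertBy_append _ _ _ _ hFfalse,
        hfilter1, hfilter2, pv_sorted_rev_append_singleton]

theorem pv_secLoopA_eq (ps : Int) (rest : List (String × Int)) (acc : List String)
    (h : acc.length < 2) :
    pvSecLoopA ps rest acc =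
      (acc ++ (rest.filter (fun p => decide (ps - 1 ≤ p.2 ∧ 0 < p.2))).map (fun p => p.1)).take 2 := by
  induction rest generalizing acc with
  | nil =>
    simp [pvSecLoopA, List.take_of_length_le (by omega : acc.length ≤ 2)]
  | cons p rest ih =>
    obtain ⟨t, s⟩ := p
    simp only [pvSecLoopA]
    by_cases hc : ps - 1 ≤ s ∧ 0 < s
    · simp only [if_pos hc]
      by_cases h2 : 2 ≤ (acc ++ [t]).length
      · have hlen : (acc ++ [t]).length = 2 := by simp at h2 ⊢; omega
        rw [if_pos h2, List.filter_cons_of_pos (by simpa using hc)]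
        rw [show acc ++ (((t, s) :: rest.filter fun p => decide (ps - 1 ≤ p.2 ∧ 0 < p.2)).map fun p => p.1)
              = (acc ++ [t]) ++ (rest.filter fun p => decide (ps - 1 ≤ p.2 ∧ 0 < p.2)).map (fun p => p.1) by simp]
        rw [List.take_left' hlen]
      · rw [if_neg h2, ih (acc ++ [t]) (by simp at h2 ⊢; omega),
          List.filter_cons_of_pos (by simpa using hc)]
        simp
    · simp only [if_neg hc]
      rw [if_neg (by omega), ih acc h, List.filter_cons_of_neg (by simpa using hc)]

theorem pv_find?_of_filter {α : Type} (p : α → Bool) (l : List α) (x : α) (t : List α)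
    (h : l.filter p = x :: t) : l.find? p = some x := by
  induction l with
  | nil => simp at h
  | cons a l ih =>
    by_cases ha : p a
    · rw [List.filter_cons_of_pos ha] at h
      rw [List.find?_cons_of_pos ha]
      exact congrArg some (List.cons_eq_cons.mp h).1
    · rw [List.filter_cons_of_neg (by simpa using ha)] at h
      rw [List.find?_cons_of_neg (by simpa using ha)]
      exact ih h

theorem pv_main (scores : List (String × Int)) (hpre : (scores.map Prod.fst).Nodup) :
    select_tags scores = select_tags_alt scores := by
  unfold select_tags select_tags_alt
  by_cases hg : scores = [] ∨ scores.all (fun p => p.2 == 0)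
  · rw [if_pos hg, if_pos hg]
  · simp only [if_neg hg]
    have hne : scores ≠ [] := fun h => hg (Or.inl h)
    obtain ⟨m, hm⟩ : ∃ m, PySem.List.max? (scores.map (fun p => p.2)) (fun v => v) = some m := by
      cases hmx : PySem.List.max? (scores.map (fun p => p.2)) (fun v => v) with
      | none =>
        exfalso
        have := (PySem.List.max?_eq_none_iff _ _).mp hmx
        simp at this
        exact hne this
      | some m => exact ⟨m, rfl⟩
    have hmax : ∀ p ∈ scores, p.2 ≤ m := by
      intro p hp
      exact PySem.List.max?_isMax hm p.2 (List.mem_map_of_mem hp)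
    have hmem : m ∈ scores.map (fun p => p.2) := PySem.List.max?_mem hm
    -- the top bucket is nonempty
    obtain ⟨⟨qt, qs⟩, F', hF⟩ : ∃ q F', scores.filter (fun p => p.2 == m) = q :: F' := by
      obtain ⟨p, hp, hpm⟩ := List.mem_map.mp hmem
      cases hFc : scores.filter (fun p => p.2 == m) with
      | nil =>
        exfalso
        have : p ∈ scores.filter (fun p => p.2 == m) := List.mem_filter.mpr ⟨hp, by simp [hpm]⟩
        rw [hFc] at this
        simp at this
      | cons q F' => exact ⟨q, F', rfl⟩
    have hqmem : (qt, qs) ∈ scores.filter (fun p => p.2 == m) := by simp [hF]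
    have hq2 : qs = m := by simpa using (List.mem_filter.mp hqmem).2
    subst hq2
    have hb := pv_sorted_bucket scores qs hmax
    have hb2 := pv_sorted_bucket (scores.filter (fun p => p.2 != qs)) (qs - 1)
      (by
        intro p hp
        have h1 := (List.mem_filter.mp hp).2
        have h2 := hmax p (List.mem_filter.mp hp).1
        simp at h1
        omega)
    rw [hb2, hF] at hb
    simp only [hm, hb, pv_find?_of_filter _ _ _ _ hF]
    split
    case _ heq => exact absurd heq (by simp)
    case _ pt ps rest heq =>
    obtain ⟨h1, h2⟩ := List.cons_eq_cons.mp heq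
    injection h1 with hpt hps
    subst hpt; subst hps; subst h2
    have hF'2 : ∀ p ∈ F', p.2 = qs := by
      intro p hp
      have : p ∈ scores.filter (fun p => p.2 == qs) := by
        rw [hF]; exact List.mem_cons_of_mem _ hp
      simpa using (List.mem_filter.mp this).2
    have hF'1 : ∀ p ∈ F', p.1 ≠ qt := by
      have hnd : ((scores.filter (fun p => p.2 == qs)).map Prod.fst).Nodup :=
        hpre.sublist (List.Sublist.map Prod.fst List.filter_sublist)
      rw [hF] at hnd
      simp only [List.map_cons, List.nodup_cons] at hnd
      intro p hp heq
      exact hnd.1 (heq ▸ List.mem_map_of_mem hp)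
    have hG1 : ∀ p ∈ (scores.filter (fun p => p.2 != qs)).filter (fun p => p.2 == qs - 1),
        p.2 = qs - 1 := by
      intro p hp; simpa using (List.mem_filter.mp hp).2
    have hS2 : ∀ p ∈ PySem.List.sorted
        ((scores.filter (fun p => p.2 != qs)).filter (fun p => p.2 != qs - 1)) (fun p => p.2) true,
        p.2 ≤ qs - 2 := by
      intro p hp
      have hp' := (PySem.List.mem_sorted _ _ _ _).mp hp
      have h1 := (List.mem_filter.mp hp').2
      have h2 := (List.mem_filter.mp (List.mem_filter.mp hp').1).2
      have h3 := hmax p (List.mem_filter.mp (List.mem_filter.mp hp').1).1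
      simp at h1 h2
      omega
    have hsec0 : scores.filter (fun p => p.2 == qs && p.1 != qt) = F' := by
      have h1 : scores.filter (fun p => p.2 == qs && p.1 != qt) =
          (scores.filter (fun p => p.2 == qs)).filter (fun p => p.1 != qt) := by
        rw [List.filter_filter]
        apply List.filter_congr
        intro a _
        rw [Bool.and_comm]
      rw [h1, hF, List.filter_cons_of_neg (by simp), List.filter_eq_self.mpr]
      intro p hp
      simpa using hF'1 p hp
    have hsec1 : scores.filter (fun p => p.2 == qs - 1) =
        (scores.filter (fun p => p.2 != qs)).filter (fun p => p.2 == qs - 1) := by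
      rw [List.filter_filter]
      apply List.filter_congr
      intro a _
      by_cases ha : a.2 = qs - 1 <;> simp [ha]
    rw [pv_secLoopA_eq _ _ _ (by simp), List.nil_append]
    simp only [List.append_eq]
    rw [List.filter_append, List.filter_append,
      hsec0, ← hsec1]
    by_cases h0 : 0 < qs
    · rw [if_pos h0]
      have hfF : F'.filter (fun p => decide (qs - 1 ≤ p.2 ∧ 0 < p.2)) = F' :=
        List.filter_eq_self.mpr (fun p hp => by
          have := hF'2 p hp; simp [this]; omega)
      have hfS : (PySem.List.sorted
          ((scores.filter (fun p => p.2 != qs)).filter (fun p => p.2 != qs - 1)) (fun p => p.2)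
          true).filter (fun p => decide (qs - 1 ≤ p.2 ∧ 0 < p.2)) = [] := by
        rw [List.filter_eq_nil_iff]
        intro p hp
        have := hS2 p hp
        simp
        omega
      rw [hfF, hfS, List.append_nil]
      by_cases h1 : 1 < qs
      · rw [if_pos h1]
        have hfG : (scores.filter (fun p => p.2 == qs - 1)).filter
            (fun p => decide (qs - 1 ≤ p.2 ∧ 0 < p.2)) = scores.filter (fun p => p.2 == qs - 1) :=
          List.filter_eq_self.mpr (fun p hp => by
            have : p.2 = qs - 1 := by simpa using (List.mem_filter.mp hp).2
            simp [this]; omega)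
        rw [hfG, List.map_append]
      · rw [if_neg h1]
        have hfG : (scores.filter (fun p => p.2 == qs - 1)).filter
            (fun p => decide (qs - 1 ≤ p.2 ∧ 0 < p.2)) = [] := by
          rw [List.filter_eq_nil_iff]
          intro p hp
          have : p.2 = qs - 1 := by simpa using (List.mem_filter.mp hp).2
          simp [this]
          omega
        rw [hfG, List.append_nil]
    · rw [if_neg h0]
      have hfF : F'.filter (fun p => decide (qs - 1 ≤ p.2 ∧ 0 < p.2)) = [] := by
        rw [List.filter_eq_nil_iff]
        intro p hp
        have := hF'2 p hp
        simp
        omega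
      have hfG : (scores.filter (fun p => p.2 == qs - 1)).filter
          (fun p => decide (qs - 1 ≤ p.2 ∧ 0 < p.2)) = [] := by
        rw [List.filter_eq_nil_iff]
        intro p hp
        have : p.2 = qs - 1 := by simpa using (List.mem_filter.mp hp).2
        simp [this]
        omega
      have hfS : (PySem.List.sorted
          ((scores.filter (fun p => p.2 != qs)).filter (fun p => p.2 != qs - 1)) (fun p => p.2)
          true).filter (fun p => decide (qs - 1 ≤ p.2 ∧ 0 < p.2)) = [] := by
        rw [List.filter_eq_nil_iff]
        intro p hp
        have := hS2 p hp
        simp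
        omega
      rw [hfF, hfG, hfS]
      simp

-- ===== VERDICT (by name: the statement is the Claim_ definition above) =====
theorem select_tags_spec : Claim_equal_select_tags := by
  intro scores _ hpre
  unfold Pre_select_tags at hpre
  unfold Spec_select_tags
  exact pv_main scores hpre
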